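-- pv_equiv track=rewrite | github.com/martinwholtmon/AoC | 2023/day_03/sol.py | find_whole_number
-- ===== SOURCE A (Python) =====
-- def find_whole_number(data, row_idx, col_idx) -> tuple[int, int]:
--     """Given a position of a number, traverse both ways to find the complete number.
--
--     Args:
--         data (list[str]): input
--         row_idx (int): row where the number is
--         col_idx (int): col where the registerd digit is located
--
--     Returns:
--         tuple[int, int]: The complete number, end index of the number
--     """
--     # Traverse left
--     left_idx = col_idx - 1
--     while left_idx >= 0 and data[row_idx][left_idx].isdigit():
--         left_idx -= 1
--
--     # Traverse right
--     right_idx = col_idx + 1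
--     while right_idx < len(data[row_idx]) and data[row_idx][right_idx].isdigit():
--         right_idx += 1
--
--     # Return the number and the end index
--     return int(data[row_idx][left_idx + 1 : right_idx]), right_idx - 1
-- ===== SOURCE B (Python) =====
-- def find_whole_number(data, row_idx, col_idx):
--     """Single forward pass over the row: track the start of the current digit run;
--     when a run ends (or the row ends), if it covers col_idx, return its int value
--     and its last index."""
--     row = data[row_idx]
--     start = None
--     for i, ch in enumerate(row):
--         if ch.isdigit():
--             if start is None:
--                 start = i
--         else:
--             if start is not None and start <= col_idx < i:
--                 return int(row[start:i]), i - 1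
--             start = None
--     if start is not None and start <= col_idx < len(row):
--         return int(row[start:]), len(row) - 1
--     raise ValueError(f"no digit run covers column {col_idx}")
-- ===== Notes on version B (the rewrite author's own statement) =====
-- stated objective: alternative
-- what changed: A scans bidirectionally outward from col_idx with two while-loops and then slices and parses; B makes one forward pass over the row tracking the start of the current digit run and returns the value and last index of the run that covers col_idx.
-- outside the precondition, e.g. on find_whole_number(['12'], 0, -1): A returns (2, 1), B raises ValueError; on find_whole_number([' 7'], 0, 0): A returns (7, 1), B raises ValueError
import Mathlib
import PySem

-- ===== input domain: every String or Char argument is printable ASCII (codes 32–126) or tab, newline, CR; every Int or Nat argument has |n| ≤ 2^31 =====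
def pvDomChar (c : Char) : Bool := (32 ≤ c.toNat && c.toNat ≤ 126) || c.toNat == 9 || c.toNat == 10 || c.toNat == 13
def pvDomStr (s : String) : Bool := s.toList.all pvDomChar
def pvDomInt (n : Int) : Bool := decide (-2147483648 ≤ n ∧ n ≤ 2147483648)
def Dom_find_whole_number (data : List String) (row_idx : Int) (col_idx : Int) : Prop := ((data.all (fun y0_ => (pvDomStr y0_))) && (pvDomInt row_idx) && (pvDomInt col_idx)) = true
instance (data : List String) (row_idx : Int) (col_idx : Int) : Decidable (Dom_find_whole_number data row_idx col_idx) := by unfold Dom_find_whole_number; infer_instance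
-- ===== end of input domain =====

-- B replaces A's two outward while-loops + slice with a single forward pass over the
-- row tracking the start of the current digit run (objective: alternative, same cost).

-- ===== PORT A =====
-- 'while left_idx >= 0 and data[row_idx][left_idx].isdigit(): left_idx -= 1'
-- (fuel only makes the loop total; inside Pre_ the fuel given below always suffices)
def goLeftA (s : List Char) : Nat → Int → Int
  | 0, i => i
  | fuel+1, i =>
    if i ≥ 0 && PySem.Chars.isdigit (PySem.List.pyGetD s i ' ') then goLeftA s fuel (i-1) else i

-- 'while right_idx < len(data[row_idx]) and data[row_idx][right_idx].isdigit(): right_idx += 1'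
def goRightA (s : List Char) : Nat → Int → Int
  | 0, i => i
  | fuel+1, i =>
    if i < (s.length : Int) && PySem.Chars.isdigit (PySem.List.pyGetD s i ' ') then goRightA s fuel (i+1) else i

def find_whole_number (data : List String) (row_idx : Int) (col_idx : Int) : Int × Int :=
  let row := (PySem.List.pyGetD data row_idx "").toList
  let left_idx := goLeftA row (col_idx + 1).toNat (col_idx - 1)
  let right_idx := goRightA row (row.length + 1) (col_idx + 1)
  -- 'return int(data[row_idx][left_idx + 1 : right_idx]), right_idx - 1'  (int() = ofChars?; none = ValueError, outside Pre_)
  ((PySem.Int.ofChars? (PySem.List.slice row (some (left_idx + 1)) (some right_idx))).getD 0,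
   right_idx - 1)

-- ===== PORT B =====
-- the 'for i, ch in enumerate(row)' loop of Source B with its early returns and the
-- trailing after-loop check; state 'start : Option Int' is Source B's 'start'
def goB (row : List Char) (col : Int) : List (Int × Char) → Option Int → Option (Int × Int)
  | [], some st =>
      if st ≤ col ∧ col < (row.length : Int) then
        some ((PySem.Int.ofChars? (PySem.List.slice row (some st) none)).getD 0, (row.length : Int) - 1)
      else none
  | [], none => none
  | (i, ch) :: rest, start =>
    if PySem.Chars.isdigit ch then
      goB row col rest (some (start.getD i))
    else
      match start with
      | some st =>
        if st ≤ col ∧ col < i then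
          some ((PySem.Int.ofChars? (PySem.List.slice row (some st) (some i))).getD 0, i - 1)
        else goB row col rest none
      | none => goB row col rest none

def find_whole_number_alt (data : List String) (row_idx : Int) (col_idx : Int) : Int × Int :=
  let row := (PySem.List.pyGetD data row_idx "").toList
  -- 'raise ValueError' = none, outside Pre_
  (goB row col_idx (PySem.List.enumerate row 0) none).getD (0, 0)

-- ===== PRECONDITION & SPEC =====
-- Pre_: row_idx a valid Python index, col_idx a non-negative in-range index, and the
-- addressed character a digit. It excludes (a) inputs where A raises (IndexError, or
-- int() failing with ValueError) and (b) corner inputs where A still returns a value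
-- only by accident of slicing/int(): a negative col_idx, or a non-digit col character
-- whose surrounding slice int() tolerates (whitespace/sign); B raises ValueError there.
def Pre_find_whole_number (data : List String) (row_idx : Int) (col_idx : Int) : Prop :=
  PySem.Raise.InRange data.length row_idx ∧
  0 ≤ col_idx ∧ col_idx < (((PySem.List.pyGetD data row_idx "").toList.length : Int)) ∧
  PySem.Chars.isdigit (PySem.List.pyGetD (PySem.List.pyGetD data row_idx "").toList col_idx ' ') = true
instance (data : List String) (row_idx : Int) (col_idx : Int) : Decidable (Pre_find_whole_number data row_idx col_idx) := by unfold Pre_find_whole_number; infer_instance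

def pvWitness_find_whole_number : List String × Int × Int := (["4a67."], 0, 2)

def Spec_find_whole_number (data : List String) (row_idx : Int) (col_idx : Int) (out : Int × Int) : Prop := out = find_whole_number_alt data row_idx col_idx
instance (data : List String) (row_idx : Int) (col_idx : Int) (out : Int × Int) : Decidable (Spec_find_whole_number data row_idx col_idx out) := by unfold Spec_find_whole_number; infer_instance

-- ===== CLAIM (what is proved, stated in full; the proofs are below) =====
def Claim_equal_find_whole_number : Prop := ∀ (data : List String) (row_idx : Int) (col_idx : Int), Dom_find_whole_number data row_idx col_idx → Pre_find_whole_number data row_idx col_idx → Spec_find_whole_number data row_idx col_idx (find_whole_number data row_idx col_idx)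

-- ===== LEMMAS AND PROOFS =====

-- abbreviation for the digit test
def isD (c : Char) : Bool := PySem.Chars.isdigit c

-- state of Source B's 'start' after consuming a chunk of the enumeration without returning
def stateAfter : List (Int × Char) → Option Int → Option Int
  | [], st => st
  | (i, ch) :: rest, st => stateAfter rest (if isD ch then some (st.getD i) else none)

theorem stateAfter_append (l₁ l₂ : List (Int × Char)) (st : Option Int) :
    stateAfter (l₁ ++ l₂) st = stateAfter l₂ (stateAfter l₁ st) := by
  induction l₁ generalizing st with
  | nil => rfl
  | cons q rest ih => cases q; simp [stateAfter, ih]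

theorem goB_no_return (row : List Char) (col : Int) (l₁ l₂ : List (Int × Char)) :
    ∀ (st : Option Int), (∀ q ∈ l₁, q.1 ≤ col) →
    goB row col (l₁ ++ l₂) st = goB row col l₂ (stateAfter l₁ st) := by
  induction l₁ with
  | nil => intro st _; rfl
  | cons q rest ih =>
    intro st h
    obtain ⟨i, ch⟩ := q
    have hi : i ≤ col := h (i, ch) (by simp)
    have hrest : ∀ q ∈ rest, q.1 ≤ col := fun q hq => h q (by simp [hq])
    by_cases hd : PySem.Chars.isdigit ch = true
    · simp only [List.cons_append, goB, hd, if_true, stateAfter, isD]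
      exact ih _ hrest
    · cases st with
      | none =>
        rw [Bool.not_eq_true] at hd
        simp only [List.cons_append, goB, stateAfter, isD, hd, Bool.false_eq_true, if_false]
        exact ih _ hrest
      | some s0 =>
        have hg : ¬ (s0 ≤ col ∧ col < i) := by omega
        simp only [List.cons_append, goB, hd, Bool.false_eq_true, if_false, hg,
          stateAfter, isD]
        exact ih _ hrest

theorem stateAfter_last_nondigit (l : List (Int × Char)) (i : Int) (ch : Char)
    (hch : isD ch = false) (st : Option Int) :
    stateAfter (l ++ [(i, ch)]) st = none := by
  rw [stateAfter_append]; simp [stateAfter, hch]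

theorem goB_digits (row : List Char) (col : Int) (l rest : List (Int × Char)) (st : Int)
    (h : ∀ q ∈ l, isD q.2 = true) :
    goB row col (l ++ rest) (some st) = goB row col rest (some st) := by
  induction l with
  | nil => rfl
  | cons q l ih =>
    obtain ⟨i, ch⟩ := q
    have hd : isD ch = true := h (i, ch) (by simp)
    simp only [isD] at hd
    simpa [goB, hd] using ih (fun q hq => h q (by simp [hq]))

theorem pyGetD_char (s : List Char) (i : Int) (h0 : 0 ≤ i) (h1 : i.toNat < s.length) :
    PySem.List.pyGetD s i ' ' = s[i.toNat] :=
  PySem.List.pyGetD_eq_getElem s ' ' h0 (by omega)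

theorem goLeftA_eq (s : List Char) (L : Nat)
    (hstop : L = 0 ∨ ∃ h : L - 1 < s.length, isD s[L-1] = false) :
    ∀ (fuel : Nat) (i : Int), (L:Int) - 1 ≤ i → i < (s.length : Int) →
      (∀ k : Nat, L ≤ k → (k:Int) ≤ i → ∃ h : k < s.length, isD s[k] = true) →
      i - ((L:Int) - 1) ≤ (fuel : Int) → goLeftA s fuel i = (L:Int) - 1 := by
  intro fuel
  induction fuel with
  | zero =>
    intro i h1 _ _ hf
    have hi : i = (L:Int) - 1 := by omega
    simp [goLeftA, hi]
  | succ fuel ih =>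
    intro i h1 h2 hdig hf
    by_cases hi : i = (L:Int) - 1
    · subst hi
      by_cases h0 : (0:Int) ≤ (L:Int) - 1
      · rcases hstop with hL0 | ⟨hlt, hnd⟩
        · omega
        · have hget : PySem.List.pyGetD s ((L:Int) - 1) ' ' = s[L-1] := by
            have := pyGetD_char s ((L:Int) - 1) h0 (by omega)
            rw [this]; congr 1; omega
          simp only [isD] at hnd
          simp [goLeftA, hget, hnd]
      · have hL0 : L = 0 := by omega
        subst hL0
        simp [goLeftA]
    · have hge : (L:Int) ≤ i := by omega
      obtain ⟨hlt, hdg⟩ := hdig i.toNat (by omega) (by omega)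
      have hget : PySem.List.pyGetD s i ' ' = s[i.toNat] := pyGetD_char s i (by omega) hlt
      simp only [isD] at hdg
      rw [show goLeftA s (fuel+1) i =
            (if i ≥ 0 && PySem.Chars.isdigit (PySem.List.pyGetD s i ' ')
             then goLeftA s fuel (i-1) else i) from rfl]
      rw [if_pos (by simp [hget, hdg]; omega)]
      exact ih (i - 1) (by omega) (by omega) (fun k hk1 hk2 => hdig k hk1 (by omega)) (by omega)

theorem goRightA_eq (s : List Char) (R : Nat) (hR : R ≤ s.length)
    (hstop : R = s.length ∨ ∃ h : R < s.length, isD s[R] = false) :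
    ∀ (fuel : Nat) (i : Int), 0 ≤ i → i ≤ (R:Int) →
      (∀ k : Nat, (i:Int) ≤ k → k < R → ∃ h : k < s.length, isD s[k] = true) →
      (R:Int) - i ≤ (fuel : Int) → goRightA s fuel i = (R:Int) := by
  intro fuel
  induction fuel with
  | zero =>
    intro i _ h1 _ hf
    have hi : i = (R:Int) := by omega
    simp [goRightA, hi]
  | succ fuel ih =>
    intro i h0 h1 hdig hf
    by_cases hi : i = (R:Int)
    · subst hi
      rcases hstop with h0' | ⟨hlt, hnd⟩
      · have : ¬ ((R:Int) < (s.length:Int)) := by omega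
        rw [show goRightA s (fuel+1) (R:Int) =
              (if (R:Int) < (s.length : Int) && PySem.Chars.isdigit (PySem.List.pyGetD s (R:Int) ' ')
               then goRightA s fuel ((R:Int)+1) else (R:Int)) from rfl]
        simp [this]
      · have hget : PySem.List.pyGetD s (R:Int) ' ' = s[R] := by
          have h' := pyGetD_char s (R:Int) (Int.natCast_nonneg R) (by omega)
          rw [h']; simp
        simp only [isD] at hnd
        rw [show goRightA s (fuel+1) (R:Int) =
              (if (R:Int) < (s.length : Int) && PySem.Chars.isdigit (PySem.List.pyGetD s (R:Int) ' ')
               then goRightA s fuel ((R:Int)+1) else (R:Int)) from rfl]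
        simp [hget, hnd]
    · have hltR : i < (R:Int) := by omega
      obtain ⟨hlt, hdg⟩ := hdig i.toNat (by omega) (by omega)
      have hget : PySem.List.pyGetD s i ' ' = s[i.toNat] := pyGetD_char s i h0 hlt
      simp only [isD] at hdg
      rw [show goRightA s (fuel+1) i =
            (if i < (s.length : Int) && PySem.Chars.isdigit (PySem.List.pyGetD s i ' ')
             then goRightA s fuel (i+1) else i) from rfl]
      rw [if_pos (by simp [hget, hdg]; omega)]
      exact ih (i + 1) (by omega) (by omega) (fun k hk1 hk2 => hdig k (by omega) hk2) (by omega)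

-- the maximal digit run of s that contains position c, as a three-way split of s
theorem run_decomp (s : List Char) (c : Nat) (hc : c < s.length) (hd : isD s[c] = true) :
    ∃ p r t : List Char, s = p ++ r ++ t ∧
      (∀ x ∈ r, isD x = true) ∧
      (∀ ch, p.getLast? = some ch → isD ch = false) ∧
      (∀ ch, t.head? = some ch → isD ch = false) ∧
      p.length ≤ c ∧ c < p.length + r.length := by
  refine ⟨((s.take c).reverse.dropWhile isD).reverse,
          ((s.take c).reverse.takeWhile isD).reverse ++ s[c] :: (s.drop (c+1)).takeWhile isD,
          (s.drop (c+1)).dropWhile isD, ?_, ?_, ?_, ?_, ?_, ?_⟩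
  · have hpr : ((s.take c).reverse.dropWhile isD).reverse ++ ((s.take c).reverse.takeWhile isD).reverse
        = s.take c := by
      rw [← List.reverse_append, List.takeWhile_append_dropWhile, List.reverse_reverse]
    have h2 : (s.drop (c+1)).takeWhile isD ++ (s.drop (c+1)).dropWhile isD = s.drop (c+1) :=
      List.takeWhile_append_dropWhile
    have h3 : (((s.take c).reverse.dropWhile isD).reverse ++ ((s.take c).reverse.takeWhile isD).reverse)
        ++ s[c] :: ((s.drop (c+1)).takeWhile isD ++ (s.drop (c+1)).dropWhile isD) = s := by
      rw [hpr, h2, List.getElem_cons_drop hc, List.take_append_drop]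
    conv_lhs => rw [← h3]
    simp [List.append_assoc]
  · intro x hx
    rcases List.mem_append.1 hx with hx | hx
    · exact List.mem_takeWhile_imp (List.mem_reverse.1 hx)
    · rcases List.mem_cons.1 hx with rfl | hx
      · exact hd
      · exact List.mem_takeWhile_imp hx
  · intro ch hch
    rw [List.getLast?_reverse] at hch
    have := List.head?_dropWhile_not isD (s.take c).reverse
    rw [hch] at this
    exact this
  · intro ch hch
    have := List.head?_dropWhile_not isD (s.drop (c+1))
    rw [hch] at this
    exact this
  · have : ((s.take c).reverse.dropWhile isD).length ≤ (s.take c).reverse.length :=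
      List.length_dropWhile_le _ _
    simp only [List.length_reverse, List.length_take] at this ⊢
    omega
  · have h1 : ((s.take c).reverse.dropWhile isD).length + ((s.take c).reverse.takeWhile isD).length
        = (s.take c).length := by
      have := congrArg List.length (List.takeWhile_append_dropWhile (p := isD) (l := (s.take c).reverse))
      simp only [List.length_append, List.length_reverse] at this
      omega
    simp only [List.length_reverse, List.length_append, List.length_cons, List.length_take] at h1 ⊢
    omega

-- ===== VERDICT (by name: the statement is the Claim_ definition above) =====
theorem find_whole_number_spec : Claim_equal_find_whole_number := by
  intro data row_idx col_idx _ hpre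
  obtain ⟨hrow, hc0, hclen, hdig⟩ := hpre
  unfold Spec_find_whole_number find_whole_number find_whole_number_alt
  set s : List Char := (PySem.List.pyGetD data row_idx "").toList with hs
  set c : Nat := col_idx.toNat with hcdef
  have hcol : col_idx = (c : Int) := by omega
  have hc : c < s.length := by omega
  have hdigc : isD s[c] = true := by
    have h' := pyGetD_char s col_idx hc0 (by omega)
    rw [h'] at hdig
    simpa [isD, hcdef] using hdig
  clear_value s
  clear_value c
  obtain ⟨p, r, t, hsd, hrdig, hplast, hthead, hLc, hcR⟩ := run_decomp s c hc hdigc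
  set L : Nat := p.length with hLdef
  set R : Nat := p.length + r.length with hRdef
  have hlen : s.length = R + t.length := by rw [hsd]; simp [hRdef]; omega
  have hRle : R ≤ s.length := by omega
  -- characters inside the run are digits
  have hmid : ∀ k : Nat, L ≤ k → k < R → ∃ h : k < s.length, isD s[k] = true := by
    intro k hk1 hk2
    refine ⟨by omega, ?_⟩
    have h1 : s[k]'(by omega) = r[k - L]'(by omega) := by
      have e0 := List.getElem_of_eq (show s = p ++ (r ++ t) from by rw [hsd, List.append_assoc])
        (show k < s.length from by omega)
      rw [e0, List.getElem_append_right (by omega : p.length ≤ k),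
        List.getElem_append_left (by omega)]
    simp only [h1]
    exact hrdig _ (List.getElem_mem _)
  -- the character before the run (if any) is not a digit
  have hstopL : L = 0 ∨ ∃ h : L - 1 < s.length, isD s[L-1] = false := by
    rcases List.eq_nil_or_concat' p with hp | ⟨p', ch, hp⟩
    · left; simp [hLdef, hp]
    · right
      have hpne : p ≠ [] := by simp [hp]
      have hL1 : 0 < L := by simp [hLdef, hp]
      refine ⟨by omega, ?_⟩
      have h1 : s[L-1]'(by omega) = p[L-1]'(by omega) := by
        have e0 := List.getElem_of_eq (show s = p ++ (r ++ t) from by rw [hsd, List.append_assoc])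
          (show L - 1 < s.length from by omega)
        rw [e0, List.getElem_append_left (by omega : L - 1 < p.length)]
      simp only [h1]
      have h2 : p[L-1]'(by omega) = p.getLast hpne := by
        rw [List.getLast_eq_getElem]
      simp only [h2]
      exact hplast _ (List.getLast?_eq_some_getLast hpne)
  -- the character after the run (if any) is not a digit
  have hstopR : R = s.length ∨ ∃ h : R < s.length, isD s[R] = false := by
    cases ht : t with
    | nil => left; rw [hlen, ht]; simp
    | cons th tt =>
      right
      have hRlt : R < s.length := by rw [hlen, ht]; simp
      refine ⟨hRlt, ?_⟩
      have h1 : s[R]'hRlt = th := by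
        have e0 := List.getElem_of_eq hsd (show R < s.length from hRlt)
        rw [e0, List.getElem_append_right (by simp [hRdef] : (p ++ r).length ≤ R)]
        simp [hRdef, ht]
      simp only [h1]
      exact hthead _ (by rw [ht]; rfl)
  -- A's two loops land on the run's boundaries
  have hleft : goLeftA s (col_idx + 1).toNat (col_idx - 1) = (L:Int) - 1 := by
    refine goLeftA_eq s L hstopL _ (col_idx - 1) (by omega) (by omega)
      (fun k hk1 hk2 => hmid k hk1 (by omega)) (by omega)
  have hright : goRightA s (s.length + 1) (col_idx + 1) = (R:Int) := by
    refine goRightA_eq s R hRle hstopR _ (col_idx + 1) (by omega) (by omega)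
      (fun k hk1 hk2 => hmid k (by omega) hk2) (by omega)
  dsimp only
  rw [hleft, hright]
  -- B's pass over the enumeration
  have henum : PySem.List.enumerate s 0
      = PySem.List.enumerate p 0 ++ (PySem.List.enumerate r (L:Int) ++ PySem.List.enumerate t (R:Int)) := by
    conv_lhs => rw [hsd]
    rw [List.append_assoc, PySem.List.enumerate_append, PySem.List.enumerate_append]
    have e1 : (0 : Int) + (p.length : Int) = (L:Int) := by omega
    have e2 : (L:Int) + (r.length : Int) = (R:Int) := by simp [hRdef]; omega
    rw [e1, e2]
  rw [henum]
  rw [goB_no_return s col_idx (PySem.List.enumerate p 0) _ none (by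
    intro q hq
    obtain ⟨k, hk, rfl⟩ := (PySem.List.mem_enumerate_iff p 0 q).1 hq
    simp only []
    omega)]
  have hstate : stateAfter (PySem.List.enumerate p 0) none = none := by
    rcases List.eq_nil_or_concat' p with hp | ⟨p', ch, hp⟩
    · simp [hp, PySem.List.enumerate_nil, stateAfter]
    · rw [hp, PySem.List.enumerate_append]
      have hch : isD ch = false := by
        apply hplast
        simp [hp]
      rw [show PySem.List.enumerate [ch] ((0:Int) + (p'.length : Int)) = [((p'.length : Int), ch)] by
        rw [PySem.List.enumerate_cons, PySem.List.enumerate_nil]; norm_num]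
      exact stateAfter_last_nondigit _ _ _ hch none
  rw [hstate]
  -- the run itself: first digit sets start := L, the rest keep it
  cases hr : r with
  | nil => exfalso; rw [hr] at hRdef; simp at hRdef; omega
  | cons rh rt =>
    have hrh : PySem.Chars.isdigit rh = true := by
      have := hrdig rh (by rw [hr]; simp)
      simpa [isD] using this
    rw [PySem.List.enumerate_cons, List.cons_append]
    rw [show goB s col_idx (((L:Int), rh) :: (PySem.List.enumerate rt ((L:Int) + 1) ++ PySem.List.enumerate t (R:Int))) none
          = goB s col_idx (PySem.List.enumerate rt ((L:Int) + 1) ++ PySem.List.enumerate t (R:Int)) (some (L:Int)) by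
      simp [goB, hrh, Option.getD]]
    rw [goB_digits s col_idx _ _ (L:Int) (by
      intro q hq
      obtain ⟨k, hk, rfl⟩ := (PySem.List.mem_enumerate_iff rt ((L:Int)+1) q).1 hq
      exact hrdig _ (by rw [hr]; exact List.mem_cons_of_mem _ (List.getElem_mem hk)))]
    -- past the run: either the row ends or a non-digit ends it; both return the run
    have hLcol : (L:Int) ≤ col_idx := by omega
    have hcolR : col_idx < (R:Int) := by omega
    have hL11 : (L:Int) - 1 + 1 = (L:Int) := by ring
    cases ht : t with
    | nil =>
      have hlenR : s.length = R := by rw [hlen, ht]; simp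
      rw [PySem.List.enumerate_nil]
      rw [show goB s col_idx [] (some (L:Int)) =
            some ((PySem.Int.ofChars? (PySem.List.slice s (some (L:Int)) none)).getD 0, ((s.length : Nat) : Int) - 1) by
        simp [goB]
        omega]
      have hsl : PySem.List.slice s (some ((L:Int) - 1 + 1)) (some (R:Int)) = PySem.List.slice s (some (L:Int)) none := by
        rw [hL11, PySem.List.slice_natCast, PySem.List.slice_from_natCast]
        apply List.take_of_length_le
        simp [hlenR]
      rw [hsl]
      simp [Option.getD, hlenR]
    | cons th tt =>
      have hth : PySem.Chars.isdigit th = false := by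
        have := hthead th (by rw [ht]; rfl)
        simpa [isD] using this
      rw [PySem.List.enumerate_cons]
      rw [show goB s col_idx (((R:Int), th) :: PySem.List.enumerate tt ((R:Int) + 1)) (some (L:Int))
            = some ((PySem.Int.ofChars? (PySem.List.slice s (some (L:Int)) (some (R:Int)))).getD 0, (R:Int) - 1) by
        simp [goB, hth]
        omega]
      rw [hL11]
      simp [Option.getD]
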